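-- pv_equiv track=rewrite | github.com/byuacm/w16-programming-contest-solutions | Naming Conventions/solution.py | buildBackMatrix
-- ===== SOURCE A (Python) =====
-- def buildBlankMatrix(n):
--     matrix = []
--     for i in range(n):
--         matrix.append([])
--         for j in range(n):
--             matrix[i].append(0)
--     return matrix
--
-- def buildBackMatrix(characters):
--     matrix = buildBlankMatrix(characters)
--     for i in range(characters):
--         for j in range(characters):
--             if i > j and i != characters - 1:
--                 value = 0
--             else:
--                 value = 1
--             matrix[i][j] = value
--     return matrix
-- ===== SOURCE B (Python) =====
-- def buildBackMatrix(characters):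
--     n = characters
--     return [[1] * n if i == n - 1 else [0] * i + [1] * (n - i)
--             for i in range(n)]
-- ===== Notes on version B (the rewrite author's own statement) =====
-- stated objective: simpler
-- what changed: B emits each row as two constant runs ([0]*i + [1]*(n-i), or [1]*n for the last row) in a single comprehension, removing A's blank-matrix pre-pass and the per-cell inner loop with its branch.
import Mathlib
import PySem

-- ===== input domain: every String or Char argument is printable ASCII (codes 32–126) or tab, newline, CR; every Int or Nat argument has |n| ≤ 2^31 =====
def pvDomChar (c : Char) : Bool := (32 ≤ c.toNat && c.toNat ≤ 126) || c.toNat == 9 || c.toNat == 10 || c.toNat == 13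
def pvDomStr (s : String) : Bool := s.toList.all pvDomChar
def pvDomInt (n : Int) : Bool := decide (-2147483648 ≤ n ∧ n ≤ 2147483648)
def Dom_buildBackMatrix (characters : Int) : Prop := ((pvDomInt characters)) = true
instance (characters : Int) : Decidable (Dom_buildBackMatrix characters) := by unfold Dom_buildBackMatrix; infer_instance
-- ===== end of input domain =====

-- B replaces A's blank-matrix pre-pass and per-cell inner loop by emitting each row
-- as two constant runs; same return value, simpler single comprehension.

-- ===== PORT A =====
def buildBlankMatrixA (n : Int) : List (List Int) :=
  (PySem.List.pyRange 0 n 1).foldl (fun matrix i =>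
    let matrix := matrix ++ [([] : List Int)]
    (PySem.List.pyRange 0 n 1).foldl
      (fun m _j => m.modify i.toNat (fun row => row ++ [(0 : Int)])) matrix) []

def buildBackMatrix (characters : Int) : List (List Int) :=
  let matrix := buildBlankMatrixA characters
  (PySem.List.pyRange 0 characters 1).foldl (fun matrix i =>
    (PySem.List.pyRange 0 characters 1).foldl (fun m j =>
      let value : Int := if i > j ∧ i ≠ characters - 1 then 0 else 1
      m.modify i.toNat (fun row => row.set j.toNat value)) matrix) matrix

-- ===== PORT B =====
def buildBackMatrix_alt (characters : Int) : List (List Int) :=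
  (PySem.List.pyRange 0 characters 1).map (fun i =>
    if i == characters - 1 then List.replicate characters.toNat (1 : Int)
    else List.replicate i.toNat (0 : Int) ++ List.replicate (characters - i).toNat (1 : Int))

-- ===== PRECONDITION & SPEC =====
def Spec_buildBackMatrix (characters : Int) (out : List (List Int)) : Prop := out = buildBackMatrix_alt characters
instance (characters : Int) (out : List (List Int)) : Decidable (Spec_buildBackMatrix characters out) := by unfold Spec_buildBackMatrix; infer_instance

-- ===== CLAIM (what is proved, stated in full; the proofs are below) =====
def Claim_equal_buildBackMatrix : Prop := ∀ (characters : Int), Dom_buildBackMatrix characters → Spec_buildBackMatrix characters (buildBackMatrix characters)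

-- ===== LEMMAS AND PROOFS =====

theorem modify_modify_same {α : Type} (l : List α) (i : Nat) (f g : α → α) :
    (l.modify i f).modify i g = l.modify i (fun x => g (f x)) := by
  apply List.ext_getElem
  · simp [List.length_modify]
  · intro j hj hj'
    rw [List.getElem_modify, List.getElem_modify, List.getElem_modify]
    by_cases h : i = j <;> simp [h]

theorem modify_id {α : Type} (l : List α) (i : Nat) :
    l.modify i (fun x => x) = l := by
  apply List.ext_getElem
  · simp [List.length_modify]
  · intro j hj hj'
    rw [List.getElem_modify]
    by_cases h : i = j <;> simp [h]

/-- A fold whose every step modifies the SAME index collapses to one modify. -/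
theorem foldl_modify_same {α β : Type} (l : List β) (i : Nat) (g : β → α → α) (m : List α) :
    l.foldl (fun m x => m.modify i (g x)) m
      = m.modify i (fun row => l.foldl (fun r x => g x r) row) := by
  induction l generalizing m with
  | nil => simp [modify_id]
  | cons b t ih => simp [List.foldl_cons, ih, modify_modify_same]

theorem length_foldl_set (l : List Nat) (f : Nat → Int) (row : List Int) :
    (l.foldl (fun r j => r.set j (f j)) row).length = row.length := by
  induction l generalizing row with
  | nil => rfl
  | cons a t ih => simp [List.foldl_cons, ih]

theorem getElem_foldl_set (l : List Nat) (f : Nat → Int) (row : List Int) (j : Nat)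
    (hj : j < (l.foldl (fun r j => r.set j (f j)) row).length) (hj' : j < row.length) :
    (l.foldl (fun r j => r.set j (f j)) row)[j] = if j ∈ l then f j else row[j] := by
  induction l generalizing row with
  | nil => simp
  | cons a t ih =>
    simp only [List.foldl_cons]
    rw [ih (row.set a (f a)) (by simpa using hj) (by simpa using hj')]
    by_cases h : j ∈ t
    · simp [h]
    · rw [if_neg h, List.getElem_set]
      by_cases h2 : a = j
      · simp [h2]
      · have hm : j ∉ a :: t := by
          simp only [List.mem_cons, not_or]
          exact ⟨fun hh => h2 hh.symm, h⟩
        rw [if_neg h2, if_neg hm]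

/-- Filling the first K cells of a row by successive `set`s. -/
theorem foldl_set_range (K : Nat) (f : Nat → Int) (row : List Int) (hK : K ≤ row.length) :
    (List.range K).foldl (fun r j => r.set j (f j)) row
      = (List.range K).map f ++ row.drop K := by
  apply List.ext_getElem
  · simp [length_foldl_set]; omega
  · intro j hj hj'
    rw [getElem_foldl_set _ f row j hj (by rw [length_foldl_set] at hj; exact hj)]
    by_cases h : j < K
    · rw [if_pos (by simpa using h), List.getElem_append_left (by simpa using h)]
      simp
    · rw [if_neg (by simpa using h), List.getElem_append_right (by simp; omega)]
      simp only [List.length_map, List.length_range]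
      rw [List.getElem_drop]
      congr 1; omega

theorem blank_row (n : Nat) :
    (List.range n).foldl (fun (r : List Int) (_ : Nat) => r ++ [(0 : Int)]) []
      = List.replicate n (0 : Int) := by
  induction n with
  | zero => simp
  | succ k ih => rw [List.range_succ, List.foldl_append, ih]; simp [List.replicate_succ']

/-- The blank-matrix builder produces `replicate n (replicate n 0)`. -/
theorem blank_eq (n : Nat) :
    buildBlankMatrixA (n : Int) = List.replicate n (List.replicate n (0 : Int)) := by
  unfold buildBlankMatrixA
  rw [PySem.List.pyRange_zero_nat, List.foldl_map]
  simp only [List.foldl_map, Int.toNat_natCast]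
  suffices h : ∀ K, K ≤ n →
      (List.range K).foldl (fun matrix (i : Nat) =>
        (List.range n).foldl
          (fun m (_ : Nat) => m.modify i (fun row => row ++ [(0:Int)])) (matrix ++ [[]]))
        []
      = List.replicate K (List.replicate n (0 : Int)) from h n le_rfl
  intro K hK
  induction K with
  | zero => simp
  | succ k ih =>
    conv_lhs => rw [List.range_succ]
    rw [List.foldl_append, ih (by omega)]
    simp only [List.foldl_cons, List.foldl_nil]
    rw [foldl_modify_same]
    apply List.ext_getElem
    · simp
    · intro j hj hj'
      rw [List.getElem_modify]
      simp only [List.length_replicate] at hj'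
      by_cases h : k = j
      · subst h
        rw [if_pos rfl, List.getElem_append_right (by simp)]
        simp [blank_row n]
      · rw [if_neg h]
        have hjk : j < k := by
          have : j < (List.replicate k (List.replicate n (0:Int)) ++ [([] : List Int)]).length := by
            simpa [List.length_modify] using hj
          simp at this; omega
        rw [List.getElem_append_left (by simpa using hjk)]
        simp [List.getElem_replicate]

/-- Target row i of the back matrix, as A computes it cell by cell. -/
def rowA (n i : Nat) : List Int :=
  (List.range n).map (fun j => if i > j ∧ (i : Int) ≠ (n : Int) - 1 then (0:Int) else 1)

theorem rowA_eq_runs (n i : Nat) (hi : i < n) :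
    rowA n i = (if (i : Int) == (n : Int) - 1 then List.replicate n (1 : Int)
      else List.replicate i (0 : Int) ++ List.replicate (n - i) (1 : Int)) := by
  unfold rowA
  by_cases h : (i : Int) = (n : Int) - 1
  · simp only [h, beq_self_eq_true, if_true]
    apply List.ext_getElem
    · simp
    · intro j hj hj'
      simp [List.getElem_replicate]
  · rw [if_neg (by simpa using h)]
    apply List.ext_getElem
    · simp; omega
    · intro j hj hj'
      simp only [List.getElem_map, List.getElem_range]
      by_cases hji : j < i
      · rw [List.getElem_append_left (by simpa using hji)]
        simp [hji, h]
      · rw [List.getElem_append_right (by simp; omega)]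
        simp only [List.getElem_replicate]
        rw [if_neg (by omega)]

/-- Main fill loop: after processing rows 0..K-1 the first K rows are the target rows. -/
theorem fill_loop (n K : Nat) (hK : K ≤ n) :
    (List.range K).foldl (fun matrix i =>
        (List.range n).foldl (fun m j =>
          m.modify i (fun row => row.set j
            (if (i:Int) > (j:Int) ∧ (i:Int) ≠ (n:Int) - 1 then (0:Int) else 1))) matrix)
      (List.replicate n (List.replicate n (0 : Int)))
    = (List.range K).map (rowA n) ++ List.replicate (n - K) (List.replicate n (0 : Int)) := by
  induction K with
  | zero => simp
  | succ k ih =>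
    conv_lhs => rw [List.range_succ]
    rw [List.foldl_append, ih (by omega)]
    simp only [List.foldl_cons, List.foldl_nil]
    rw [foldl_modify_same]
    apply List.ext_getElem
    · simp [List.length_modify]; omega
    · intro j hj hj'
      rw [List.getElem_modify]
      have hjlen : j < n := by
        have := hj'; simp at this; omega
      by_cases h : k = j
      · subst h
        rw [if_pos rfl, List.getElem_append_right (by simp)]
        simp only [List.length_map, List.length_range, Nat.sub_self, List.getElem_replicate]
        rw [List.getElem_append_left (by simp), List.getElem_map, List.getElem_range]
        have hset := foldl_set_range n
          (fun j => if (k:Int) > (j:Int) ∧ (k:Int) ≠ (n:Int) - 1 then (0:Int) else 1)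
          (List.replicate n (0:Int)) (by simp)
        simp only [List.drop_replicate, Nat.sub_self, List.replicate_zero,
          List.append_nil] at hset
        rw [hset]; simp [rowA]
      · rw [if_neg h]
        by_cases hjk : j < k
        · rw [List.getElem_append_left (by simpa using hjk),
              List.getElem_append_left (by simp; omega)]
          rw [List.getElem_map, List.getElem_map, List.getElem_range, List.getElem_range]
        · rw [List.getElem_append_right (by simp; omega),
              List.getElem_append_right (by simp; omega)]
          simp [List.getElem_replicate]

theorem ports_agree_nat (n : Nat) :
    buildBackMatrix (n : Int) = buildBackMatrix_alt (n : Int) := by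
  unfold buildBackMatrix buildBackMatrix_alt
  rw [PySem.List.pyRange_zero_nat, blank_eq]
  simp only [List.foldl_map, List.map_map, Int.toNat_natCast]
  rw [fill_loop n n le_rfl]
  simp only [Nat.sub_self, List.replicate_zero, List.append_nil]
  apply List.map_congr_left
  intro i hi
  simp only [Function.comp_apply]
  rw [rowA_eq_runs n i (by simpa using hi)]
  by_cases h : (i : Int) = (n : Int) - 1
  · simp [h]
  · rw [if_neg (by simpa using h), if_neg (by simpa using h)]
    have hin : i < n := by simpa using hi
    have h2 : (Int.toNat ((n : Int) - (i : Int))) = n - i := by omega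
    simp [h2]

-- ===== VERDICT (by name: the statement is the Claim_ definition above) =====
theorem buildBackMatrix_spec : Claim_equal_buildBackMatrix := by
  intro characters _
  unfold Spec_buildBackMatrix
  by_cases h : characters ≤ 0
  · unfold buildBackMatrix buildBackMatrix_alt buildBlankMatrixA
    rw [PySem.List.pyRange_one_eq_nil h]
    simp
  · have hc : characters = ((characters.toNat : Nat) : Int) := by omega
    rw [hc, ports_agree_nat]
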